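-- pv_equiv track=rewrite | github.com/BackupTheBerlios/kdeskel | karamba/kalendar/ckalendar.py | searchArray
-- ===== SOURCE A (Python) =====
-- def searchArray(sArray, fContent):
-- 	# unfortunately the index() function doesn't work if the searched value
-- 	# doesn't exist, so we have to create our own. It returns -1 if the value
-- 	# was not found.
-- 	x = len(sArray)
-- 	i = 0
-- 	e = -1
-- 	while i <= (x - 1):
-- 		if sArray[i] == fContent:
-- 			e = i
-- 		i = i + 1
-- 	return e
-- ===== SOURCE B (Python) =====
-- def searchArray(sArray, fContent):
--     # Find the last index of fContent, -1 if absent: search the reversed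
--     # view with the built-in .index and map the position back.
--     try:
--         return len(sArray) - 1 - sArray[::-1].index(fContent)
--     except ValueError:
--         return -1
-- ===== Notes on version B (the rewrite author's own statement) =====
-- stated objective: idiomatic
-- what changed: Replaces the manual index loop with a running last-match variable by reversing the list once and using the built-in .index on the reversed view, mapping the first match back with len-1-j and turning ValueError into -1 (C-level built-ins remove the Python-level loop).
import Mathlib
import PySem

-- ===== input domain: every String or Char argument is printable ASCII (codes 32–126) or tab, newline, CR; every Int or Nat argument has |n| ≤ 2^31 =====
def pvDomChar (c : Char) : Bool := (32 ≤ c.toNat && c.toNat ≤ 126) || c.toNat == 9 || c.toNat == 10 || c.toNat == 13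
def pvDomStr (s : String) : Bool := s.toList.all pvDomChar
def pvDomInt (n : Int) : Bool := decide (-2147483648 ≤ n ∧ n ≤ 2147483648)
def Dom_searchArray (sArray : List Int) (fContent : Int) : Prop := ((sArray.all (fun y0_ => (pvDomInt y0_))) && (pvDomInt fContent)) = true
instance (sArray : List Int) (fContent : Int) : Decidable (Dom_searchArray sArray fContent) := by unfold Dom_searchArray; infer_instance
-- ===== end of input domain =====

-- B replaces the manual scan with a single reversal plus first-match index, mapped back arithmetically (idiomatic).

-- ===== PORT A =====
def searchArray (sArray : List Int) (fContent : Int) : Int :=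
  -- x = len(sArray); i from 0 while i <= x-1; e starts at -1, set to i on match
  (PySem.List.pyRange 0 (sArray.length : Int) 1).foldl
    (fun e i => if PySem.List.pyGetD sArray i 0 = fContent then i else e) (-1)

-- ===== PORT B =====
def searchArray_alt (sArray : List Int) (fContent : Int) : Int :=
  -- try: return len(sArray) - 1 - sArray[::-1].index(fContent) / except ValueError: return -1
  match (PySem.List.slice? sArray none none (-1)).bind
      (fun rev => PySem.List.index? rev fContent) with
  | some j => (sArray.length : Int) - 1 - (j : Int)
  | none => -1

-- ===== PRECONDITION & SPEC =====
def Spec_searchArray (sArray : List Int) (fContent : Int) (out : Int) : Prop := out = searchArray_alt sArray fContent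
instance (sArray : List Int) (fContent : Int) (out : Int) : Decidable (Spec_searchArray sArray fContent out) := by unfold Spec_searchArray; infer_instance

-- ===== CLAIM (what is proved, stated in full; the proofs are below) =====
def Claim_equal_searchArray : Prop := ∀ (sArray : List Int) (fContent : Int), Dom_searchArray sArray fContent → Spec_searchArray sArray fContent (searchArray sArray fContent)

-- ===== LEMMAS AND PROOFS =====

lemma searchArray_nil (f : Int) : searchArray [] f = -1 := by
  simp [searchArray, PySem.List.pyRange_one_eq_nil]

lemma searchArray_concat (xs : List Int) (a f : Int) :
    searchArray (xs ++ [a]) f = if a = f then (xs.length : Int) else searchArray xs f := by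
  unfold searchArray
  have hlen : ((xs ++ [a]).length : Int) = (xs.length : Int) + 1 := by
    simp
  rw [hlen, PySem.List.pyRange_one_succ_right (by positivity), List.foldl_append]
  have hcongr :
      (PySem.List.pyRange 0 (xs.length : Int) 1).foldl
        (fun e i => if PySem.List.pyGetD (xs ++ [a]) i 0 = f then i else e) (-1) =
      (PySem.List.pyRange 0 (xs.length : Int) 1).foldl
        (fun e i => if PySem.List.pyGetD xs i 0 = f then i else e) (-1) := by
    apply PySem.List.foldl_congr_mem
    intro e i hi
    have hmem := (PySem.List.mem_pyRange_one).1 hi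
    have h0 : 0 ≤ i := hmem.1
    have h1 : i < (xs.length : Int) := hmem.2
    have hget : PySem.List.pyGetD (xs ++ [a]) i 0 = PySem.List.pyGetD xs i 0 := by
      rw [PySem.List.pyGetD_eq_getElem _ _ h0 (by simp; omega),
          PySem.List.pyGetD_eq_getElem _ _ h0 (by omega)]
      exact List.getElem_append_left (by omega)
    rw [hget]
  rw [hcongr]
  have hlast : PySem.List.pyGetD (xs ++ [a]) (xs.length : Int) 0 = a := by
    rw [PySem.List.pyGetD_eq_getElem _ _ (by positivity) (by simp)]
    simp
  simp [List.foldl, hlast]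

lemma searchArray_alt_nil (f : Int) : searchArray_alt [] f = -1 := by
  simp [searchArray_alt, PySem.List.slice?_none_none_neg_one, PySem.List.index?_eq_idxOf?]

lemma searchArray_alt_concat (xs : List Int) (a f : Int) :
    searchArray_alt (xs ++ [a]) f = if a = f then (xs.length : Int) else searchArray_alt xs f := by
  unfold searchArray_alt
  rw [PySem.List.slice?_none_none_neg_one, PySem.List.slice?_none_none_neg_one]
  simp only [Option.bind_some, List.reverse_append, List.reverse_singleton, List.singleton_append]
  by_cases h : a = f
  · subst h
    rw [PySem.List.index?_cons_self]
    simp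
  · rw [PySem.List.index?_cons_of_ne xs.reverse h]
    cases hidx : PySem.List.index? xs.reverse f with
    | none => simp [h]
    | some j =>
      simp only [Option.map_some]
      simp [h]
      omega

theorem searchArray_eq_alt (sArray : List Int) (fContent : Int) :
    searchArray sArray fContent = searchArray_alt sArray fContent := by
  induction sArray using List.reverseRecOn with
  | nil => rw [searchArray_nil, searchArray_alt_nil]
  | append_singleton xs a ih =>
      rw [searchArray_concat, searchArray_alt_concat, ih]

-- ===== VERDICT (by name: the statement is the Claim_ definition above) =====
theorem searchArray_spec : Claim_equal_searchArray := by
  intro sArray fContent _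
  unfold Spec_searchArray
  exact searchArray_eq_alt sArray fContent
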